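-- pv_equiv track=rewrite | github.com/venca-labs/open-range | src/open_range/builder/manifest_graph.py | _merge_dependency_edges
-- ===== SOURCE A (Python) =====
-- from typing import Any
--
-- def _merge_dependency_edges(
--     raw_edges: object,
--     host_catalog: dict[str, dict[str, Any]],
-- ) -> list[dict[str, str]]:
--     edges: list[dict[str, str]] = []
--     seen: set[tuple[str, str]] = set()
--     if isinstance(raw_edges, list):
--         for raw in raw_edges:
--             if not isinstance(raw, dict):
--                 continue
--             source = str(raw.get("source", "")).strip()
--             target = str(raw.get("target", "")).strip()
--             if not source or not target or (source, target) in seen: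
--                 continue
--             edges.append({"source": source, "target": target})
--             seen.add((source, target))
--
--     for source, raw_catalog in host_catalog.items():
--         raw_targets = raw_catalog.get("connects_to", [])
--         if not isinstance(raw_targets, list):
--             continue
--         for raw_target in raw_targets:
--             target = str(raw_target).strip()
--             if not target or (source, target) in seen:
--                 continue
--             edges.append({"source": source, "target": target})
--             seen.add((source, target))
--     return edges
-- ===== SOURCE B (Python) =====
-- def _merge_dependency_edges(raw_edges, host_catalog):
--     rest = []
--     if isinstance(raw_edges, list):
--         for raw in raw_edges:
--             if not isinstance(raw, dict):
--                 continue
--             source = str(raw.get("source", "")).strip()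
--             target = str(raw.get("target", "")).strip()
--             if source and target:
--                 rest.append((source, target))
--     for source, raw_catalog in host_catalog.items():
--         raw_targets = raw_catalog.get("connects_to", [])
--         if not isinstance(raw_targets, list):
--             continue
--         for raw_target in raw_targets:
--             target = str(raw_target).strip()
--             if target:
--                 rest.append((source, target))
--     edges = []
--     while rest:
--         head = rest[0]
--         edges.append({"source": head[0], "target": head[1]})
--         rest = [p for p in rest[1:] if p != head]
--     return edges
-- ===== Notes on version B (the rewrite author's own statement) =====
-- stated objective: alternative
-- what changed: A's single scan with a running 'seen' set is replaced by a set-free sieve: gather the validated (source, target) pairs, then repeatedly take the first remaining pair and filter all its later duplicates out of the remaining stream, so no membership structure is maintained.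
import Mathlib
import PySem

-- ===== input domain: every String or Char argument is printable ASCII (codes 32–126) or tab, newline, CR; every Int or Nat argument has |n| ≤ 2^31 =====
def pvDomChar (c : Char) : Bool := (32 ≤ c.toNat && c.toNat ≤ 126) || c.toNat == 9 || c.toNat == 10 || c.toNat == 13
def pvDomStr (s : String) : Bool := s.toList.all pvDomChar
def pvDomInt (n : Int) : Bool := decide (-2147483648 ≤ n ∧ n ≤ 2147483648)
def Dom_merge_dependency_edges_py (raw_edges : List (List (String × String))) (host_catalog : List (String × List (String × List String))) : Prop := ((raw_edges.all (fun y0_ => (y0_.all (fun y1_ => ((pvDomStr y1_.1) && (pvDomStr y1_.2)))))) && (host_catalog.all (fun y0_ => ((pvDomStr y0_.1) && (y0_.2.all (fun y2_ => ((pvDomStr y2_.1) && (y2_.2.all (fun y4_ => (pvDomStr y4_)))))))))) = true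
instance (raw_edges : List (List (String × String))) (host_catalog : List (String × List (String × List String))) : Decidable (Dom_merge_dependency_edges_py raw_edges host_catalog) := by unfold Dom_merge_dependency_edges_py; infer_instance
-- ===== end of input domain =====

-- B replaces A's running 'seen' set by a set-free sieve: gather validated pairs, then
-- repeatedly emit the first remaining pair and filter its duplicates out of the rest (alternative).


-- an edge dict {"source": s, "target": t}
def pvMkEdge (p : String × String) : List (String × String) := [("source", p.1), ("target", p.2)]

-- ===== PORT A =====
-- raw.get(k, "") on the assoc-list model of a dict: first match, default "".
-- (str(...) on the already-String values is the identity; the isinstance guards are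
-- always true under the given typing.)
def pvGetStr (raw : List (String × String)) (k : String) : String :=
  (List.lookup k raw).getD ""

-- one raw edge step of A's first loop (state: edges so far, seen set)
def pvAStep1 (st : List (List (String × String)) × PySem.Set (String × String))
    (raw : List (String × String)) :
    List (List (String × String)) × PySem.Set (String × String) :=
  let source := PySem.Str.strip (pvGetStr raw "source")
  let target := PySem.Str.strip (pvGetStr raw "target")
  if source = "" || target = "" || PySem.Set.contains st.2 (source, target) then st
  else (st.1 ++ [pvMkEdge (source, target)], PySem.Set.add st.2 (source, target))

-- one inner target step of A's second loop
def pvAStep2i (source : String)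
    (st : List (List (String × String)) × PySem.Set (String × String))
    (raw_target : String) :
    List (List (String × String)) × PySem.Set (String × String) :=
  let target := PySem.Str.strip raw_target
  if target = "" || PySem.Set.contains st.2 (source, target) then st
  else (st.1 ++ [pvMkEdge (source, target)], PySem.Set.add st.2 (source, target))

-- one catalog item step of A's second loop
def pvAStep2 (st : List (List (String × String)) × PySem.Set (String × String))
    (item : String × List (String × List String)) :
    List (List (String × String)) × PySem.Set (String × String) :=
  let raw_targets := (List.lookup "connects_to" item.2).getD []
  raw_targets.foldl (pvAStep2i item.1) st

def merge_dependency_edges_py (raw_edges : List (List (String × String))) (host_catalog : List (String × List (String × List String))) : List (List (String × String)) :=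
  let st1 := raw_edges.foldl pvAStep1 ([], PySem.Set.empty)
  let st2 := host_catalog.foldl pvAStep2 st1
  st2.1

-- ===== PORT B =====
-- gather phase: validated candidate pairs, raw_edges first, then catalog items in order
def pvCandidates (raw_edges : List (List (String × String))) (host_catalog : List (String × List (String × List String))) : List (String × String) :=
  (raw_edges.filterMap (fun raw =>
      let source := PySem.Str.strip (pvGetStr raw "source")
      let target := PySem.Str.strip (pvGetStr raw "target")
      if source ≠ "" ∧ target ≠ "" then some (source, target) else none))
  ++ (host_catalog.flatMap (fun item =>
      ((List.lookup "connects_to" item.2).getD []).filterMap (fun raw_target =>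
        let target := PySem.Str.strip raw_target
        if target ≠ "" then some (item.1, target) else none)))

-- B's while loop: emit the head as an edge dict, drop its duplicates from the rest
def pvEmit : List (String × String) → List (List (String × String))
  | [] => []
  | head :: rest => pvMkEdge head :: pvEmit (rest.filter (fun p => p ≠ head))
termination_by l => l.length
decreasing_by
  rw [List.length_unattach]
  exact Nat.lt_succ_of_le (le_of_le_of_eq (List.length_filter_le _ _) List.length_attach)

def merge_dependency_edges_py_alt (raw_edges : List (List (String × String))) (host_catalog : List (String × List (String × List String))) : List (List (String × String)) :=
  pvEmit (pvCandidates raw_edges host_catalog)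

-- ===== PRECONDITION & SPEC =====
def Spec_merge_dependency_edges_py (raw_edges : List (List (String × String))) (host_catalog : List (String × List (String × List String))) (out : List (List (String × String))) : Prop := out = merge_dependency_edges_py_alt raw_edges host_catalog
instance (raw_edges : List (List (String × String))) (host_catalog : List (String × List (String × List String))) (out : List (List (String × String))) : Decidable (Spec_merge_dependency_edges_py raw_edges host_catalog out) := by unfold Spec_merge_dependency_edges_py; infer_instance

-- ===== CLAIM (what is proved, stated in full; the proofs are below) =====
def Claim_equal_merge_dependency_edges_py : Prop := ∀ (raw_edges : List (List (String × String))) (host_catalog : List (String × List (String × List String))), Dom_merge_dependency_edges_py raw_edges host_catalog → Spec_merge_dependency_edges_py raw_edges host_catalog (merge_dependency_edges_py raw_edges host_catalog)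

-- ===== LEMMAS AND PROOFS =====

-- the dedup step A performs on each validated candidate pair
def pvDStep (st : List (List (String × String)) × PySem.Set (String × String))
    (p : String × String) :
    List (List (String × String)) × PySem.Set (String × String) :=
  if PySem.Set.contains st.2 p then st
  else (st.1 ++ [pvMkEdge p], PySem.Set.add st.2 p)

-- the new (previously unseen) candidates, first occurrences in order
def pvNewOf (seen : List (String × String)) : List (String × String) → List (String × String)
  | [] => []
  | p :: cs =>
    if PySem.Set.contains seen p then pvNewOf seen cs
    else p :: pvNewOf (seen ++ [p]) cs

theorem pvFoldl_dstep (cs : List (String × String)) :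
    ∀ (es : List (List (String × String))) (seen : List (String × String)),
    cs.foldl pvDStep (es, seen) = (es ++ (pvNewOf seen cs).map pvMkEdge, seen ++ pvNewOf seen cs) := by
  induction cs with
  | nil => intro es seen; simp [pvNewOf]
  | cons p cs ih =>
    intro es seen
    by_cases h : p ∈ seen
    · simp [List.foldl, pvDStep, pvNewOf, h, ih]
    · simp [List.foldl, pvDStep, pvNewOf, h, PySem.Set.add, ih]

-- A's first-loop step is the dedup step applied to the (optional) validated candidate
theorem pvStep1_eq (st : List (List (String × String)) × PySem.Set (String × String))
    (raw : List (String × String)) :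
    pvAStep1 st raw =
      match (let source := PySem.Str.strip (pvGetStr raw "source")
             let target := PySem.Str.strip (pvGetStr raw "target")
             if source ≠ "" ∧ target ≠ "" then some (source, target) else none) with
      | none => st
      | some p => pvDStep st p := by
  simp only [pvAStep1, pvDStep]
  by_cases hs : PySem.Str.strip (pvGetStr raw "source") = "" <;>
    by_cases ht : PySem.Str.strip (pvGetStr raw "target") = "" <;>
      simp [hs, ht]

theorem pvStep2i_eq (source : String)
    (st : List (List (String × String)) × PySem.Set (String × String))
    (raw_target : String) :
    pvAStep2i source st raw_target =
      match (let target := PySem.Str.strip raw_target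
             if target ≠ "" then some (source, target) else none) with
      | none => st
      | some p => pvDStep st p := by
  simp only [pvAStep2i, pvDStep]
  by_cases ht : PySem.Str.strip raw_target = "" <;> simp [ht]

-- folding an "optional-candidate" step over a list = folding the dedup step over the filterMap
theorem pvFoldl_filterMap {α : Type} (f : α → Option (String × String)) (l : List α) :
    ∀ st, l.foldl (fun st a => match f a with | none => st | some p => pvDStep st p) st
      = (l.filterMap f).foldl pvDStep st := by
  induction l with
  | nil => intro st; simp
  | cons a l ih =>
    intro st
    cases hfa : f a <;> simp [List.foldl, hfa, ih]

theorem pvFoldl_flatMap {α : Type} (g : α → List (String × String)) (l : List α) :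
    ∀ st, l.foldl (fun st a => (g a).foldl pvDStep st) st
      = (l.flatMap g).foldl pvDStep st := by
  induction l with
  | nil => intro st; simp
  | cons a l ih =>
    intro st
    simp [List.foldl, List.flatMap_cons, List.foldl_append, ih]

-- A computes the dedup fold over the gathered candidate list
theorem pvA_eq_fold (raw_edges : List (List (String × String)))
    (host_catalog : List (String × List (String × List String))) :
    merge_dependency_edges_py raw_edges host_catalog
      = ((pvCandidates raw_edges host_catalog).foldl pvDStep ([], [])).1 := by
  have e1 : raw_edges.foldl pvAStep1 (([], PySem.Set.empty) :
      List (List (String × String)) × PySem.Set (String × String))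
      = (raw_edges.filterMap (fun raw =>
          let source := PySem.Str.strip (pvGetStr raw "source")
          let target := PySem.Str.strip (pvGetStr raw "target")
          if source ≠ "" ∧ target ≠ "" then some (source, target) else none)).foldl
          pvDStep ([], PySem.Set.empty) := by
    rw [← pvFoldl_filterMap]
    exact PySem.List.foldl_congr_mem _ _ _ _ (fun st raw _ => pvStep1_eq st raw)
  have e2 : ∀ st, host_catalog.foldl pvAStep2 st
      = (host_catalog.flatMap (fun item =>
          ((List.lookup "connects_to" item.2).getD []).filterMap (fun raw_target =>
            let target := PySem.Str.strip raw_target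
            if target ≠ "" then some (item.1, target) else none))).foldl pvDStep st := by
    intro st
    rw [← pvFoldl_flatMap]
    refine PySem.List.foldl_congr_mem _ _ _ _ (fun st item _ => ?_)
    unfold pvAStep2
    rw [← pvFoldl_filterMap]
    exact PySem.List.foldl_congr_mem _ _ _ _ (fun st rt _ => pvStep2i_eq item.1 st rt)
  show (host_catalog.foldl pvAStep2 (raw_edges.foldl pvAStep1 ([], PySem.Set.empty))).1 = _
  unfold pvCandidates
  rw [e1, e2, List.foldl_append]
  rfl

-- the first-occurrence list relative to a seen set equals the sieve on the unseen candidates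
theorem pvNewOf_emit (cs : List (String × String)) :
    ∀ seen : List (String × String),
    (pvNewOf seen cs).map pvMkEdge = pvEmit (cs.filter (fun q => decide (q ∉ seen))) := by
  induction cs with
  | nil => intro seen; simp [pvNewOf, pvEmit]
  | cons p cs ih =>
    intro seen
    by_cases h : p ∈ seen
    · simp [pvNewOf, h, ih]
    · have : (cs.filter (fun q => decide (q ∉ seen))).filter (fun q => q ≠ p)
          = cs.filter (fun q => decide (q ∉ seen ++ [p])) := by
        rw [List.filter_filter]
        refine List.filter_congr (fun q _ => ?_)
        simp [List.mem_append, and_comm]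
      rw [show pvNewOf seen (p :: cs) = p :: pvNewOf (seen ++ [p]) cs from by
        simp [pvNewOf, h]]
      rw [show (p :: cs).filter (fun q => decide (q ∉ seen))
          = p :: cs.filter (fun q => decide (q ∉ seen)) from by simp [h]]
      rw [List.map_cons, ih (seen ++ [p]), pvEmit, this]

-- ===== VERDICT (by name: the statement is the Claim_ definition above) =====
theorem merge_dependency_edges_py_spec : Claim_equal_merge_dependency_edges_py := by
  intro raw_edges host_catalog _
  unfold Spec_merge_dependency_edges_py merge_dependency_edges_py_alt
  rw [pvA_eq_fold, pvFoldl_dstep, pvNewOf_emit]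
  simp
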